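-- pv_equiv track=rewrite | github.com/silte/bambu-stream | stream_manager.py | _summarize_ffmpeg_stderr
-- ===== SOURCE A (Python) =====
-- _TRANSIENT_FFMPEG_MESSAGES = (
--     "error in the push function",
--     "error in the pull function",
--     "io error:",
--     "connection reset by peer",
--     "end of file",
--     "session has been invalidated",
--     "error during demuxing: input/output error",
-- )
--
-- def _summarize_ffmpeg_stderr(stderr_text: str) -> str:
--     """Extract a compact one-line reason from FFmpeg stderr output."""
--     lines = [line.strip()
--              for line in (stderr_text or "").splitlines() if line.strip()]
--     if not lines:
--         return "unknown upstream disconnect"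
--
--     for line in reversed(lines):
--         lower = line.lower()
--         if any(msg in lower for msg in _TRANSIENT_FFMPEG_MESSAGES):
--             return line
--     return lines[-1]
-- ===== SOURCE B (Python) =====
-- _TRANSIENT_FFMPEG_MESSAGES = (
--     "error in the push function",
--     "error in the pull function",
--     "io error:",
--     "connection reset by peer",
--     "end of file",
--     "session has been invalidated",
--     "error during demuxing: input/output error",
-- )
--
-- def _summarize_ffmpeg_stderr(stderr_text: str) -> str:
--     """Extract a compact one-line reason from FFmpeg stderr output."""
--     # Single streaming pass: no intermediate line list, no reversed() scan.
--     last = None   # last non-empty stripped line seen so far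
--     hit = None    # last such line containing a transient message
--     for raw in (stderr_text or "").splitlines():
--         line = raw.strip()
--         if not line:
--             continue
--         last = line
--         lower = line.lower()
--         if any(msg in lower for msg in _TRANSIENT_FFMPEG_MESSAGES):
--             hit = line
--     if last is None:
--         return "unknown upstream disconnect"
--     return hit if hit is not None else last
-- ===== Notes on version B (the rewrite author's own statement) =====
-- stated objective: alternative
-- what changed: Replaces A's build-a-filtered-list-then-reverse-scan-with-early-return by a single streaming pass over the raw lines that maintains two accumulators (last non-empty line, last transient-matching line) and never materialises the line list or reverses anything.
import Mathlib
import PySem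

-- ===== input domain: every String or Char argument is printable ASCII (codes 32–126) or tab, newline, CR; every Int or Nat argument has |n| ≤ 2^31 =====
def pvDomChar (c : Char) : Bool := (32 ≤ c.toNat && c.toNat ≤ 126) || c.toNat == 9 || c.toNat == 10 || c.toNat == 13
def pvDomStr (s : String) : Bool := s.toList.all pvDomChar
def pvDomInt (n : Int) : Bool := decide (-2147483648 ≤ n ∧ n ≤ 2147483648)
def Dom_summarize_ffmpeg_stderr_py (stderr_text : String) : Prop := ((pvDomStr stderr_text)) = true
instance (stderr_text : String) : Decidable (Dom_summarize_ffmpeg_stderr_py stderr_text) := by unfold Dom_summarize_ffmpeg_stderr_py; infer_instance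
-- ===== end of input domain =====

-- B replaces A's list-build + reverse scan by one streaming pass with two accumulators — same cost, no speed claim.

-- module-level constant _TRANSIENT_FFMPEG_MESSAGES (shared context of both versions)
def transientMsgs : List String :=
  ["error in the push function",
   "error in the pull function",
   "io error:",
   "connection reset by peer",
   "end of file",
   "session has been invalidated",
   "error during demuxing: input/output error"]

-- ===== PORT A =====
-- the reverse-scan loop of A: first line (of the given, already reversed, list) whose lowercase contains a transient message
def aRevScan : List String → Option String
  | [] => none
  | l :: rest =>
      if transientMsgs.any (fun msg => PySem.Str.isIn msg (PySem.Str.lower l)) then some l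
      else aRevScan rest

def summarize_ffmpeg_stderr_py (stderr_text : String) : String :=
  let lines := ((PySem.Str.splitlines stderr_text).filter
      (fun line => PySem.Str.strip line ≠ "")).map PySem.Str.strip
  if lines = [] then "unknown upstream disconnect"
  else
    match aRevScan lines.reverse with
    | some l => l
    | none => PySem.List.pyGetD lines (-1) ""   -- lines[-1]; lines ≠ [] here

-- ===== PORT B =====
-- loop body of Source B: state = (last non-empty stripped line, last matching line)
def bStep (st : Option String × Option String) (raw : String) : Option String × Option String :=
  let line := PySem.Str.strip raw
  if line = "" then st
  else
    (some line,
     if transientMsgs.any (fun msg => PySem.Str.isIn msg (PySem.Str.lower line)) then some line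
     else st.2)

def summarize_ffmpeg_stderr_py_alt (stderr_text : String) : String :=
  let st := (PySem.Str.splitlines stderr_text).foldl bStep (none, none)
  match st.1 with
  | none => "unknown upstream disconnect"
  | some last =>
      match st.2 with
      | some hit => hit
      | none => last

-- ===== PRECONDITION & SPEC =====
def Spec_summarize_ffmpeg_stderr_py (stderr_text : String) (out : String) : Prop := out = summarize_ffmpeg_stderr_py_alt stderr_text
instance (stderr_text : String) (out : String) : Decidable (Spec_summarize_ffmpeg_stderr_py stderr_text out) := by unfold Spec_summarize_ffmpeg_stderr_py; infer_instance

-- ===== CLAIM =====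
def Claim_equal_summarize_ffmpeg_stderr_py : Prop := ∀ (stderr_text : String), Dom_summarize_ffmpeg_stderr_py stderr_text → Spec_summarize_ffmpeg_stderr_py stderr_text (summarize_ffmpeg_stderr_py stderr_text)

-- ===== LEMMAS AND PROOFS =====

def linesOf (ys : List String) : List String :=
  (ys.filter (fun line => PySem.Str.strip line ≠ "")).map PySem.Str.strip

def matchPred (line : String) : Bool :=
  transientMsgs.any (fun msg => PySem.Str.isIn msg (PySem.Str.lower line))

-- A's reverse scan returns the first match of its argument
theorem aRevScan_eq_head_filter (xs : List String) :
    aRevScan xs = (xs.filter matchPred).head? := by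
  induction xs with
  | nil => rfl
  | cons l rest ih =>
      simp only [aRevScan, List.filter_cons, matchPred]
      by_cases h : (transientMsgs.any (fun msg => PySem.Str.isIn msg (PySem.Str.lower l))) = true
      · rw [if_pos h, if_pos h]; rfl
      · rw [if_neg h, if_neg h]; exact ih

-- hence on the reversed list it is the LAST match of the original list
theorem aRevScan_reverse (xs : List String) :
    aRevScan xs.reverse = (xs.filter matchPred).getLast? := by
  rw [aRevScan_eq_head_filter, List.filter_reverse, List.head?_reverse]

theorem getLast?_cons_or (a : String) (l : List String) :
    (a :: l).getLast? = l.getLast?.or (some a) := by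
  cases h : l.getLast? with
  | none => rw [List.getLast?_eq_none_iff] at h; subst h; rfl
  | some b =>
      rw [List.getLast?_cons, h]
      rfl

-- invariant of B's fold: fst is the last non-empty stripped line, snd the last matching one
theorem bFold_inv (ys : List String) (st : Option String × Option String) :
    ys.foldl bStep st =
      ((linesOf ys).getLast?.or st.1, ((linesOf ys).filter matchPred).getLast?.or st.2) := by
  induction ys generalizing st with
  | nil => simp [linesOf]
  | cons y ys ih =>
      rw [List.foldl_cons, ih]
      by_cases h : PySem.Str.strip y = ""
      · have hlz : linesOf (y :: ys) = linesOf ys := by simp [linesOf, h]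
        have hb : bStep st y = st := by simp [bStep, h]
        rw [hlz, hb]
      · have hlz : linesOf (y :: ys) = PySem.Str.strip y :: linesOf ys := by
          simp [linesOf, h]
        have hb : bStep st y = (some (PySem.Str.strip y),
            if matchPred (PySem.Str.strip y) then some (PySem.Str.strip y) else st.2) := by
          simp [bStep, h, matchPred]
        rw [hlz, hb, getLast?_cons_or]
        by_cases hm : matchPred (PySem.Str.strip y) = true
        · rw [List.filter_cons_of_pos hm, getLast?_cons_or, if_pos hm]
          simp
        · rw [List.filter_cons_of_neg (by simp [hm]), if_neg hm]
          simp

-- ===== VERDICT =====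
theorem summarize_ffmpeg_stderr_py_spec : Claim_equal_summarize_ffmpeg_stderr_py := by
  intro stderr_text _
  unfold Spec_summarize_ffmpeg_stderr_py summarize_ffmpeg_stderr_py summarize_ffmpeg_stderr_py_alt
  rw [bFold_inv]
  simp only [Option.or_none]
  set lines := ((PySem.Str.splitlines stderr_text).filter
      (fun line => PySem.Str.strip line ≠ "")).map PySem.Str.strip with hl
  have hlines : linesOf (PySem.Str.splitlines stderr_text) = lines := rfl
  rw [hlines]
  by_cases hnil : lines = []
  · simp [hnil]
  · rw [if_neg hnil, aRevScan_reverse]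
    cases hL : lines.getLast? with
    | none => exact absurd (List.getLast?_eq_none_iff.mp hL) hnil
    | some last =>
        cases hM : (lines.filter matchPred).getLast? with
        | none =>
            simp only []
            rw [PySem.List.pyGetD_neg_one lines "" hnil]
            rw [List.getLast?_eq_some_getLast hnil] at hL
            exact Option.some.inj hL
        | some hit => rfl
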